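-- pv_equiv track=rewrite | github.com/weldonj/CA4023_Sentiment_Analysis_BERT | _build/jupyter_execute/Baseline-Copy1.py | get_document_preview
-- ===== SOURCE A (Python) =====
-- def get_document_preview(document, max_length = 72):
--     s = []
--     count = 0
--     reached_limit = False
--     for sentence in document:
--         for token in sentence:
--             if count + len(token) + len(s) > max_length:
--                 reached_limit = True
--                 break
--             s.append(token)
--             count += len(token)
--         if reached_limit:
--             break
--     return '|'.join(s)
-- ===== SOURCE B (Python) =====
-- def get_document_preview(document, max_length = 72):
--     # Flatten once, build the table of projected join-lengths, locate the cutoff.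
--     tokens = [t for sentence in document for t in sentence]
--     proj = []
--     total = 0
--     for i, t in enumerate(tokens):
--         total += len(t) + (1 if i else 0)
--         proj.append(total)
--     k = 0
--     while k < len(tokens) and proj[k] <= max_length:
--         k += 1
--     return '|'.join(tokens[:k])
-- ===== Notes on version B (the rewrite author's own statement) =====
-- stated objective: alternative
-- what changed: Replaces A's nested greedy loop with running counter and double break by flatten-once, build a prefix table of projected join-lengths, then locate the cutoff index and join the prefix.
import Mathlib
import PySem

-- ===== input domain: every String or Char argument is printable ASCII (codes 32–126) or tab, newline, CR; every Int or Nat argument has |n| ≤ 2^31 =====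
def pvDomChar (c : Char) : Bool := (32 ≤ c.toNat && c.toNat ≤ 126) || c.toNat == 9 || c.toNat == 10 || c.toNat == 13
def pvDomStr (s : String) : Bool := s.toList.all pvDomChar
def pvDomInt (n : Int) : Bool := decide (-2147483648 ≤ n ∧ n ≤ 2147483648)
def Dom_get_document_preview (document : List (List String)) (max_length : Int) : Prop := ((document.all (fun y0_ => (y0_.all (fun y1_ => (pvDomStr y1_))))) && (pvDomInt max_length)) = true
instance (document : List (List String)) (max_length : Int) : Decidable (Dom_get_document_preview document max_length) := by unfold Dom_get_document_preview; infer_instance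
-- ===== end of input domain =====

-- B builds the flattened token list and a prefix table of projected join-lengths, then joins the prefix before the cutoff;
-- A's nested loop with a running counter and double break is ported literally. Both are total; they agree on all inputs.

-- ===== PORT A =====
-- inner 'for token in sentence' loop: returns (s, count, reached_limit)
def pvInnerA (ml : Int) : List String → List String → Int → (List String × Int × Bool)
  | [], s, count => (s, count, false)
  | t :: ts, s, count =>
      if count + PySem.Str.len t + (s.length : Int) > ml then (s, count, true)
      else pvInnerA ml ts (s ++ [t]) (count + PySem.Str.len t)

-- outer 'for sentence in document' loop with the reached_limit break
def pvOuterA (ml : Int) : List (List String) → List String → Int → List String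
  | [], s, _ => s
  | sent :: rest, s, count =>
      match pvInnerA ml sent s count with
      | (s', count', r) => if r then s' else pvOuterA ml rest s' count'

def get_document_preview (document : List (List String)) (max_length : Int) : String :=
  PySem.Str.join "|" (pvOuterA max_length document [] 0)

-- ===== PORT B =====
-- proj table: cumulative projected join-lengths (i, total as in Source B's loop)
def pvProjB : List String → Nat → Int → List Int
  | [], _, _ => []
  | t :: ts, i, total =>
      let total' := total + PySem.Str.len t + (if i = 0 then 0 else 1)
      total' :: pvProjB ts (i + 1) total'

-- the 'while k < len(tokens) and proj[k] <= max_length' cutoff scan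
def pvCutoffB (ml : Int) : List Int → Nat
  | [] => 0
  | p :: ps => if p ≤ ml then 1 + pvCutoffB ml ps else 0

def get_document_preview_alt (document : List (List String)) (max_length : Int) : String :=
  let tokens := document.flatMap (fun sentence => sentence)
  let proj := pvProjB tokens 0 0
  let k := pvCutoffB max_length proj
  PySem.Str.join "|" (List.take k tokens)

-- ===== PRECONDITION & SPEC =====
def Spec_get_document_preview (document : List (List String)) (max_length : Int) (out : String) : Prop := out = get_document_preview_alt document max_length
instance (document : List (List String)) (max_length : Int) (out : String) : Decidable (Spec_get_document_preview document max_length out) := by unfold Spec_get_document_preview; infer_instance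

-- ===== CLAIM (what is proved, stated in full; the proofs are below) =====
def Claim_equal_get_document_preview : Prop := ∀ (document : List (List String)) (max_length : Int), Dom_get_document_preview document max_length → Spec_get_document_preview document max_length (get_document_preview document max_length)

-- ===== LEMMAS AND PROOFS =====

-- common greedy recursion over the flattened token stream
def pvGreedy (ml : Int) : List String → List String → Int → List String
  | [], s, _ => s
  | t :: ts, s, count =>
      if count + PySem.Str.len t + (s.length : Int) > ml then s
      else pvGreedy ml ts (s ++ [t]) (count + PySem.Str.len t)

-- A-side: processing one sentence then the rest of the stream equals the inner loop + break logic
theorem pvGreedy_append (ml : Int) (sent : List String) :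
    ∀ (rest s : List String) (count : Int),
      pvGreedy ml (sent ++ rest) s count =
        (match pvInnerA ml sent s count with
         | (s', count', r) => if r then s' else pvGreedy ml rest s' count') := by
  induction sent with
  | nil => intro rest s count; simp [pvInnerA]
  | cons t ts ih =>
      intro rest s count
      simp only [List.cons_append, pvGreedy, pvInnerA]
      by_cases h : count + PySem.Str.len t + (s.length : Int) > ml
      · rw [if_pos h, if_pos h]; rfl
      · rw [if_neg h, if_neg h]; exact ih rest (s ++ [t]) (count + PySem.Str.len t)

theorem pvOuterA_eq_greedy (ml : Int) :
    ∀ (doc : List (List String)) (s : List String) (count : Int),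
      pvOuterA ml doc s count = pvGreedy ml (doc.flatMap (fun x => x)) s count := by
  intro doc
  induction doc with
  | nil => intro s count; simp [pvOuterA, pvGreedy]
  | cons sent rest ih =>
      intro s count
      simp only [List.flatMap_cons, pvOuterA, pvGreedy_append]
      cases hInner : pvInnerA ml sent s count with
      | mk s' p =>
        cases p with
        | mk count' r =>
          by_cases hr : r = true
          · simp [hr]
          · simp only [Bool.not_eq_true] at hr; simp [hr, ih]

-- B-side: the greedy recursion equals taking the cutoff prefix of the projected-length table
theorem pvGreedy_eq_take (ml : Int) :
    ∀ (ts s : List String) (count : Int) (i : Nat) (total : Int),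
      i = s.length →
      total + (if i = 0 then 0 else 1) = count + (i : Int) →
      pvGreedy ml ts s count = s ++ List.take (pvCutoffB ml (pvProjB ts i total)) ts := by
  intro ts
  induction ts with
  | nil => intro s count i total _ _; simp [pvProjB, pvCutoffB, pvGreedy]
  | cons t ts ih =>
      intro s count i total hi htot
      simp only [pvProjB, pvGreedy, pvCutoffB]
      have hproj : total + PySem.Str.len t + (if i = 0 then 0 else 1) =
          count + PySem.Str.len t + (s.length : Int) := by
        rcases Nat.eq_zero_or_pos i with h0 | h0
        · simp [h0] at htot ⊢; subst hi; omega
        · have : ¬ i = 0 := by omega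
          simp [this] at htot ⊢; subst hi; omega
      by_cases h : count + PySem.Str.len t + (s.length : Int) > ml
      · have hnle : ¬ (total + PySem.Str.len t + (if i = 0 then 0 else 1) ≤ ml) := by omega
        rw [if_pos h, if_neg hnle]
        simp
      · have hle : total + PySem.Str.len t + (if i = 0 then 0 else 1) ≤ ml := by omega
        rw [if_neg h, if_pos hle,
            ih (s ++ [t]) (count + PySem.Str.len t) (i + 1)
              (total + PySem.Str.len t + (if i = 0 then 0 else 1))
              (by simp [hi]) (by simp; omega)]
        have htake : ∀ (n : Nat) (x : String) (xs : List String),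
            List.take (1 + n) (x :: xs) = x :: List.take n xs := by
          intro n x xs; rw [Nat.add_comm]; rfl
        rw [htake, List.append_assoc, List.singleton_append]

-- ===== VERDICT (by name: the statement is the Claim_ definition above) =====
theorem get_document_preview_spec : Claim_equal_get_document_preview := by
  intro document max_length _
  unfold Spec_get_document_preview get_document_preview get_document_preview_alt
  rw [pvOuterA_eq_greedy, pvGreedy_eq_take max_length _ [] 0 0 0 rfl (by simp)]
  simp
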